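-- pv_equiv track=rewrite | github.com/anthonytk31415/leetcode | python-fundamentals/bits/minimumOneBitOperations.py | minimumOneBitOperations1
-- ===== SOURCE A (Python) =====
-- def minimumOneBitOperations1(x):
--     def changeLastBit(x):
--         x_lastBit = x & 1
--         bitWise_x_lastBit = ~x_lastBit & 1
--         return ((x >> 1)<< 1) | bitWise_x_lastBit
--
--     # returns position of the first 1 from right to left of a bit representation
--     # this is an O(n) operation; can I reduce this to O(1)?
--
--     # In this update, we use x & -x
--     # note -x is the same as ~x + 1. Think of this as a definition and it's called two's complement.
--     # in this form, if we do x & -x, we get the first occurrence of 1.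
--     def findFirstOne(x):
--         # count = 0
--         # n = 1
--         # while x & (n << count) == 0:
--         #     count += 1
--         # return count + 1
--         return (x & -x ).bit_length()
--
--     # take x, shift to 1 more than first one position, change last bit, shift left one
--     def changePastFirstOne(x):
--         firstOnePosition = findFirstOne(x)
--         bitAfterFirst = (changeLastBit(x >> firstOnePosition) << 1 | 1) << firstOnePosition - 1
--         return bitAfterFirst
--
--     z = 0
--     changeLast = True
--     numOperations = 0
--     while z != x:
--         if changeLast:
--             z = changeLastBit(z)
--         else:
--             z = changePastFirstOne(z)
--
--         changeLast = not changeLast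
--         numOperations += 1
--     return numOperations
--
-- x = 173
-- ===== SOURCE B (Python) =====
-- def minimumOneBitOperations1(x):
--     # Gray-to-binary: the k-th step of A's process reaches the k-th Gray code,
--     # so the answer is the Gray-code index of x, computed in O(log x).
--     ans = 0
--     while x > 0:
--         ans ^= x
--         x >>= 1
--     return ans
-- ===== Notes on version B (the rewrite author's own statement) =====
-- stated objective: faster
-- what changed: A simulates the Gray-code walk step by step, one loop iteration per counted operation (O(answer) iterations); B computes the same count directly as the Gray-to-binary conversion 'ans ^= x; x >>= 1' in O(log x) iterations.
import Mathlib
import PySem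

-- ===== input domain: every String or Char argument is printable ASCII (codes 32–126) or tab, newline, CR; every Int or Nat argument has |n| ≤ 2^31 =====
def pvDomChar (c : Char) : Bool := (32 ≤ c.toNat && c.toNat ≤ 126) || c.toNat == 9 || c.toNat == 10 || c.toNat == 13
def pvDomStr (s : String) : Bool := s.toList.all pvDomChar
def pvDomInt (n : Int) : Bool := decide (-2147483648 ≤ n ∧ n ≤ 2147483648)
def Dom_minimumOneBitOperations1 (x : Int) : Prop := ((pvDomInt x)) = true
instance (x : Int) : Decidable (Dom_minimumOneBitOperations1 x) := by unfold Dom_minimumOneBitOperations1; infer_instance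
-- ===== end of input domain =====

-- B replaces A's step-by-step simulation of the Gray-code walk (one loop iteration per
-- counted operation) by the Gray-to-binary conversion loop (one iteration per bit of x).

-- ===== PORT A =====
def pvChangeLastBit (x : Int) : Int :=
  let xLastBit := PySem.Int.band x 1
  let bitWiseXLastBit := PySem.Int.band (Int.not xLastBit) 1
  PySem.Int.bor ((x >>> (1:Nat)) <<< (1:Nat)) bitWiseXLastBit

def pvFindFirstOne (x : Int) : Nat :=
  PySem.Int.bitLength (PySem.Int.band x (-x))

-- shift counts are Nat (bit_length is a Nat in PySem); Python's '<< firstOnePosition - 1'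
-- would raise for firstOnePosition = 0, but that argument is never reached from the loop
def pvChangePastFirstOne (x : Int) : Int :=
  let firstOnePosition := pvFindFirstOne x
  (PySem.Int.bor (pvChangeLastBit (x >>> firstOnePosition) <<< (1:Nat)) 1) <<< (firstOnePosition - 1)

-- A's 'while z != x' loop; the fuel only makes it total: for every x admitted by
-- Dom ∧ Pre_ the loop is proved to stop after < 2^32 iterations, within the fuel.
def pvALoop (x : Int) : Nat → Int → Bool → Int → Int
  | 0, _, _, numOperations => numOperations
  | fuel+1, z, changeLast, numOperations =>
    if z = x then numOperations
    else pvALoop x fuel (if changeLast then pvChangeLastBit z else pvChangePastFirstOne z)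
           (!changeLast) (numOperations + 1)

def minimumOneBitOperations1 (x : Int) : Int := pvALoop x 4294967296 0 true 0

-- ===== PORT B =====
def pvBLoop (x ans : Int) : Int :=
  if 0 < x then pvBLoop (x >>> (1:Nat)) (PySem.Int.bxor ans x) else ans
termination_by x.toNat
decreasing_by
  have h2 : x >>> (1:Nat) = x / 2 := by rw [Int.shiftRight_eq_div_pow]; norm_num
  omega

def minimumOneBitOperations1_alt (x : Int) : Int := pvBLoop x 0

-- ===== PRECONDITION & SPEC =====
-- Pre_ excludes negative x, where Python A never returns: its loop state z stays nonnegative forever.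
def Pre_minimumOneBitOperations1 (x : Int) : Prop := 0 ≤ x
instance (x : Int) : Decidable (Pre_minimumOneBitOperations1 x) := by
  unfold Pre_minimumOneBitOperations1; infer_instance
def pvWitness_minimumOneBitOperations1 : Int := 173

def Spec_minimumOneBitOperations1 (x : Int) (out : Int) : Prop := out = minimumOneBitOperations1_alt x
instance (x : Int) (out : Int) : Decidable (Spec_minimumOneBitOperations1 x out) := by unfold Spec_minimumOneBitOperations1; infer_instance

-- ===== CLAIM (what is proved, stated in full; the proofs are below) =====
def Claim_equal_minimumOneBitOperations1 : Prop := ∀ (x : Int), Dom_minimumOneBitOperations1 x → Pre_minimumOneBitOperations1 x → Spec_minimumOneBitOperations1 x (minimumOneBitOperations1 x)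

-- ===== LEMMAS AND PROOFS =====

theorem pvSRCast (n s : Nat) : ((n:Nat):Int) >>> s = ((n >>> s : Nat) : Int) :=
  (Int.natCast_shiftRight n s).symm

theorem pvSLCast (n s : Nat) : ((n:Nat):Int) <<< s = ((n <<< s : Nat) : Int) :=
  (Int.natCast_shiftLeft n s).symm

theorem pvModHalf (x y : Nat) (h1 : x % 2 = y % 2) (h2 : x / 2 = y / 2) : x = y := by omega

theorem pvXorMod (a b : Nat) : (a ^^^ b) % 2 = (a % 2 + b % 2) % 2 := by
  rcases Nat.even_or_odd a with ha | ha <;> rcases Nat.even_or_odd b with hb | hb <;> simp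

theorem pvXorEE (a b : Nat) : (2*a) ^^^ (2*b) = 2*(a ^^^ b) := by
  apply pvModHalf
  · rw [pvXorMod]; omega
  · rw [Nat.xor_div_two]
    rw [show (2*a)/2 = a by omega, show (2*b)/2 = b by omega, show (2*(a^^^b))/2 = a^^^b by omega]

theorem pvXorOE (a b : Nat) : (2*a+1) ^^^ (2*b) = 2*(a ^^^ b) + 1 := by
  apply pvModHalf
  · rw [pvXorMod]; omega
  · rw [Nat.xor_div_two]
    rw [show (2*a+1)/2 = a by omega, show (2*b)/2 = b by omega,
        show (2*(a^^^b)+1)/2 = a^^^b by omega]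

theorem pvXorEO (a b : Nat) : (2*a) ^^^ (2*b+1) = 2*(a ^^^ b) + 1 := by
  rw [Nat.xor_comm, pvXorOE, Nat.xor_comm]

theorem pvXorOO (a b : Nat) : (2*a+1) ^^^ (2*b+1) = 2*(a ^^^ b) := by
  apply pvModHalf
  · rw [pvXorMod]; omega
  · rw [Nat.xor_div_two]
    rw [show (2*a+1)/2 = a by omega, show (2*b+1)/2 = b by omega,
        show (2*(a^^^b))/2 = a^^^b by omega]

theorem pvOrE1 (a : Nat) : (2*a) ||| 1 = 2*a + 1 := by
  apply pvModHalf
  · rcases Nat.or_mod_two_eq_one (a := 2*a) (b := 1) with h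
    omega
  · rw [Nat.or_div_two]
    rw [show (2*a)/2 = a by omega, show (1:Nat)/2 = 0 by omega, show (2*a+1)/2 = a by omega]
    simp

-- lowest set bit, as A's 'x & -x' computes it on a positive n
def pvLowbit (n : Nat) : Nat := n - (n &&& (n-1))

theorem pvAndPredOdd (k : Nat) : (2*k+1) &&& (2*k) = 2*k := by
  apply pvModHalf
  · have hiff := Nat.and_mod_two_eq_one (a := 2*k+1) (b := 2*k)
    omega
  · rw [Nat.and_div_two, show (2*k+1)/2 = k by omega, show (2*k)/2 = k by omega]
    simp

theorem pvLowbitOdd (k : Nat) : pvLowbit (2*k+1) = 1 := by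
  unfold pvLowbit
  rw [show 2*k+1-1 = 2*k by omega, pvAndPredOdd]
  omega

theorem pvAndPredEven (w : Nat) (h : 0 < w) : (2*w) &&& (2*w-1) = 2*(w &&& (w-1)) := by
  apply pvModHalf
  · have hiff := Nat.and_mod_two_eq_one (a := 2*w) (b := 2*w-1)
    omega
  · rw [Nat.and_div_two, show (2*w)/2 = w by omega, show (2*w-1)/2 = w-1 by omega,
        show (2*(w &&& (w-1)))/2 = w &&& (w-1) by omega]

theorem pvLowbitEven (w : Nat) (h : 0 < w) : pvLowbit (2*w) = 2 * pvLowbit w := by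
  unfold pvLowbit
  rw [pvAndPredEven w h]
  have := Nat.and_le_left (n := w) (m := w-1)
  omega

theorem pvLowbitPos (n : Nat) (h : 0 < n) : 0 < pvLowbit n := by
  induction n using Nat.strong_induction_on with
  | _ n ih =>
    rcases Nat.even_or_odd n with ⟨k, hk⟩ | ⟨k, hk⟩
    · have hk' : n = 2*k := by omega
      subst hk'
      rw [pvLowbitEven k (by omega)]
      have := ih k (by omega) (by omega)
      omega
    · have hk' : n = 2*k+1 := by omega
      subst hk'
      rw [pvLowbitOdd]
      omega

theorem pvBandNegSelf (n : Nat) (h : 0 < n) :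
    PySem.Int.band (n:Int) (-(n:Int)) = ((pvLowbit n : Nat) : Int) := by
  have h0 : ¬ (0:Int) ≤ -(n:Int) := by omega
  have h1 : (0:Int) ≤ (n:Int) := by omega
  simp only [PySem.Int.band, h1, if_pos, h0, if_false]
  have h2 : (-(-(n:Int)) - 1).toNat = n - 1 := by omega
  have h3 : ((n:Int)).toNat = n := by omega
  rw [h2, h3]
  rfl

theorem pvFFOCast (n : Nat) (h : 0 < n) :
    pvFindFirstOne (n:Int) = PySem.Int.bitLength ((pvLowbit n : Nat) : Int) := by
  unfold pvFindFirstOne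
  rw [pvBandNegSelf n h]

theorem pvFFOOdd (k : Nat) : pvFindFirstOne ((2*k+1 : Nat) : Int) = 1 := by
  rw [pvFFOCast _ (by omega), pvLowbitOdd]
  decide

theorem pvFFOEven (w : Nat) (h : 0 < w) :
    pvFindFirstOne ((2*w : Nat) : Int) = pvFindFirstOne ((w : Nat) : Int) + 1 := by
  rw [pvFFOCast _ (by omega), pvFFOCast _ h, pvLowbitEven w h]
  rw [PySem.Int.bitLength_natCast (m := 2 * pvLowbit w) (by have := pvLowbitPos w h; omega)]
  rw [show (2 * pvLowbit w)/2 = pvLowbit w by omega]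

theorem pvFFOPos (w : Nat) (h : 0 < w) : 1 ≤ pvFindFirstOne ((w : Nat) : Int) := by
  rw [pvFFOCast _ h]
  rw [PySem.Int.bitLength_natCast (pvLowbitPos w h)]
  omega

-- what changeLastBit computes on a nonnegative value: flip the last bit
def pvClbN (n : Nat) : Nat := 2*(n/2) + (1 - n % 2)

theorem pvCLBCast (n : Nat) : pvChangeLastBit (n:Int) = ((pvClbN n : Nat) : Int) := by
  simp only [pvChangeLastBit, pvClbN]
  rw [show (1:Int) = ((1:Nat):Int) by norm_num]
  rw [PySem.Int.band_natCast, Nat.and_one_is_mod]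
  rw [pvSRCast n 1, pvSLCast (n >>> 1) 1]
  rcases Nat.mod_two_eq_zero_or_one n with h2 | h2 <;> rw [h2]
  · rw [show PySem.Int.band (Int.not ((0:Nat):Int)) ((1:Nat):Int) = ((1:Nat):Int) by decide]
    rw [PySem.Int.bor_natCast]
    rw [show n >>> 1 <<< 1 = 2*(n/2) by rw [Nat.shiftRight_one, Nat.shiftLeft_eq]; omega]
    rw [pvOrE1]
  · rw [show PySem.Int.band (Int.not ((1:Nat):Int)) ((1:Nat):Int) = ((0:Nat):Int) by decide]
    rw [PySem.Int.bor_natCast]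
    rw [show n >>> 1 <<< 1 = 2*(n/2) by rw [Nat.shiftRight_one, Nat.shiftLeft_eq]; omega]
    simp

-- the Gray code
def pvG (n : Nat) : Nat := n ^^^ n/2

theorem pvGTwoMul (m : Nat) : pvG (2*m) = 2 * pvG m + m % 2 := by
  unfold pvG
  rcases Nat.even_or_odd m with ⟨c, hc⟩ | ⟨c, hc⟩
  · have hc' : m = 2*c := by omega
    subst hc'
    rw [show (2*(2*c))/2 = 2*c by omega, show (2*c)/2 = c by omega, show (2*c)%2 = 0 by omega]
    have := pvXorEE (2*c) c
    omega
  · subst hc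
    rw [show (2*(2*c+1))/2 = 2*c+1 by omega, show (2*c+1)/2 = c by omega,
        show (2*c+1)%2 = 1 by omega]
    have := pvXorEO (2*c+1) c
    omega

theorem pvGTwoMulAddOne (m : Nat) : pvG (2*m+1) = 2 * pvG m + (1 - m % 2) := by
  unfold pvG
  rcases Nat.even_or_odd m with ⟨c, hc⟩ | ⟨c, hc⟩
  · have hc' : m = 2*c := by omega
    subst hc'
    rw [show (2*(2*c)+1)/2 = 2*c by omega, show (2*c)/2 = c by omega, show (2*c)%2 = 0 by omega]
    have := pvXorOE (2*c) c
    omega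
  · subst hc
    rw [show (2*(2*c+1)+1)/2 = 2*c+1 by omega, show (2*c+1)/2 = c by omega,
        show (2*c+1)%2 = 1 by omega]
    have := pvXorOO (2*c+1) c
    omega

theorem pvGPos (n : Nat) (h : 0 < n) : 0 < pvG n := by
  induction n using Nat.strong_induction_on with
  | _ n ih =>
    rcases Nat.even_or_odd n with ⟨k, hk⟩ | ⟨k, hk⟩
    · have hk' : n = 2*k := by omega
      subst hk'
      rw [pvGTwoMul]
      have := ih k (by omega) (by omega)
      omega
    · have hk' : n = 2*k+1 := by omega
      subst hk'
      rw [pvGTwoMulAddOne]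
      rcases Nat.mod_two_eq_zero_or_one k with h2 | h2
      · omega
      · have : 0 < k := by omega
        have := ih k (by omega) this
        omega

theorem pvGDivTwo (n : Nat) : pvG n / 2 = pvG (n/2) := by
  unfold pvG
  rw [Nat.xor_div_two]

-- the even step: changeLastBit sends Gray(2m) to Gray(2m+1)
theorem pvClbNG (m : Nat) : pvClbN (pvG (2*m)) = pvG (2*m+1) := by
  rw [pvGTwoMul, pvGTwoMulAddOne]
  unfold pvClbN
  omega

theorem pvSE (m : Nat) :
    pvChangeLastBit ((pvG (2*m) : Nat) : Int) = ((pvG (2*m+1) : Nat) : Int) := by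
  rw [pvCLBCast, pvClbNG]

-- changePastFirstOne on an odd argument
theorem pvCPFOdd (a : Nat) :
    pvChangePastFirstOne ((2*a+1 : Nat) : Int) = ((2 * pvClbN a + 1 : Nat) : Int) := by
  simp only [pvChangePastFirstOne]
  rw [pvFFOOdd a]
  rw [pvSRCast (2*a+1) 1, show (2*a+1) >>> 1 = a by rw [Nat.shiftRight_one]; omega]
  rw [pvCLBCast, pvSLCast (pvClbN a) 1]
  rw [show (1:Int) = ((1:Nat):Int) by norm_num, PySem.Int.bor_natCast]
  rw [show pvClbN a <<< 1 = 2 * pvClbN a by rw [Nat.shiftLeft_eq]; omega, pvOrE1]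
  simp

-- changePastFirstOne on a positive even argument doubles its value on the half
theorem pvCPFEven (w : Nat) (h : 0 < w) :
    pvChangePastFirstOne ((2*w : Nat) : Int) = 2 * pvChangePastFirstOne ((w : Nat) : Int) := by
  simp only [pvChangePastFirstOne]
  rw [pvFFOEven w h]
  have hp1 := pvFFOPos w h
  set p := pvFindFirstOne ((w : Nat) : Int) with hp
  have hs : ((2*w : Nat) : Int) >>> (p+1) = ((w : Nat) : Int) >>> p := by
    rw [pvSRCast (2*w) (p+1), pvSRCast w p]
    rw [show (2*w) >>> (p+1) = w >>> p by
      rw [show p+1 = 1+p by omega, Nat.shiftRight_add, Nat.shiftRight_one,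
          show (2*w)/2 = w by omega]]
  rw [hs]
  rw [show p+1-1 = (p-1)+1 by omega]
  rw [Int.shiftLeft_add]
  rw [show ∀ y : Int, y <<< (1:Nat) = 2*y by intro y; rw [Int.shiftLeft_eq]; ring]

-- the odd step: changePastFirstOne sends Gray(2m+1) to Gray(2m+2)
theorem pvSO (m : Nat) :
    pvChangePastFirstOne ((pvG (2*m+1) : Nat) : Int) = ((pvG (2*m+2) : Nat) : Int) := by
  induction m using Nat.strong_induction_on with
  | _ m ih =>
    rcases Nat.even_or_odd m with ⟨j, hj⟩ | ⟨j, hj⟩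
    · have hj' : m = 2*j := by omega
      subst hj'
      rw [show pvG (2*(2*j)+1) = 2 * pvG (2*j) + 1 by rw [pvGTwoMulAddOne]; omega]
      rw [pvCPFOdd (pvG (2*j)), pvClbNG]
      rw [show 2*(2*j)+2 = 2*(2*j+1) by omega, pvGTwoMul (2*j+1)]
      rw [show (2*j+1) % 2 = 1 by omega]
    · subst hj
      rw [show pvG (2*(2*j+1)+1) = 2 * pvG (2*j+1) by rw [pvGTwoMulAddOne]; omega]
      rw [pvCPFEven (pvG (2*j+1)) (pvGPos _ (by omega))]
      rw [ih j (by omega)]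
      rw [show 2*(2*j+1)+2 = 2*(2*j+2) by omega, pvGTwoMul (2*j+2)]
      rw [show (2*j+2) % 2 = 0 by omega]
      push_cast
      ring

-- B's loop in Nat form
def pvBN (m a : Nat) : Nat :=
  if 0 < m then pvBN (m/2) (a ^^^ m) else a
termination_by m
decreasing_by omega

theorem pvBLoopCast (m a : Nat) : pvBLoop ((m:Nat):Int) ((a:Nat):Int) = ((pvBN m a : Nat) : Int) := by
  induction m using Nat.strong_induction_on generalizing a with
  | _ m ih =>
    rw [pvBLoop, pvBN]
    by_cases hm : 0 < m
    · rw [if_pos (by exact_mod_cast hm), if_pos hm]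
      rw [pvSRCast m 1, Nat.shiftRight_one]
      rw [PySem.Int.bxor_natCast]
      exact ih (m/2) (by omega) (a ^^^ m)
    · rw [if_neg (by exact_mod_cast hm), if_neg hm]

theorem pvBNXor (m : Nat) : ∀ a, pvBN m a = a ^^^ pvBN m 0 := by
  induction m using Nat.strong_induction_on with
  | _ m ih =>
    intro a
    conv_lhs => rw [pvBN]
    conv_rhs => rw [pvBN]
    by_cases hm : 0 < m
    · rw [if_pos hm, if_pos hm]
      rw [ih (m/2) (by omega) (a ^^^ m), ih (m/2) (by omega) (0 ^^^ m)]
      simp [Nat.xor_assoc]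
    · rw [if_neg hm, if_neg hm]
      simp

theorem pvBNG (n : Nat) : pvBN (pvG n) 0 = n := by
  induction n using Nat.strong_induction_on with
  | _ n ih =>
    by_cases hn : 0 < n
    · rw [pvBN, if_pos (pvGPos n hn)]
      rw [pvGDivTwo, pvBNXor, ih (n/2) (by omega)]
      unfold pvG
      simp
    · have : n = 0 := by omega
      subst this
      rw [show pvG 0 = 0 from rfl, pvBN]
      simp

theorem pvGInj (a b : Nat) (h : pvG a = pvG b) : a = b := by
  have ha := pvBNG a
  rw [h, pvBNG] at ha
  omega

theorem pvGBN (m : Nat) : pvG (pvBN m 0) = m := by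
  induction m using Nat.strong_induction_on with
  | _ m ih =>
    by_cases hm : 0 < m
    · rw [pvBN, if_pos hm, pvBNXor]
      have hr := ih (m/2) (by omega)
      unfold pvG at hr ⊢
      rw [Nat.xor_div_two]
      rw [show (0 ^^^ m) = m by simp]
      rw [show m ^^^ pvBN (m / 2) 0 ^^^ (m / 2 ^^^ pvBN (m / 2) 0 / 2)
            = m ^^^ (pvBN (m / 2) 0 ^^^ pvBN (m / 2) 0 / 2) ^^^ m / 2 by
        simp [Nat.xor_comm, Nat.xor_left_comm]]
      rw [hr]
      simp
    · have : m = 0 := by omega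
      subst this
      rw [pvBN]
      simp [pvG]

theorem pvBNLt (t m : Nat) : ∀ a, m < 2^t → a < 2^t → pvBN m a < 2^t := by
  induction m using Nat.strong_induction_on with
  | _ m ih =>
    intro a hm ha
    rw [pvBN]
    by_cases h : 0 < m
    · rw [if_pos h]
      exact ih (m/2) (by omega) (a ^^^ m) (by omega) (Nat.xor_lt_two_pow ha hm)
    · rw [if_neg h]; exact ha

theorem pvALoopG (x : Int) (k : Nat) : ∀ (f n : Nat) (c : Int), k < f →
    x = ((pvG (n+k) : Nat) : Int) →
    pvALoop x f ((pvG n : Nat) : Int) (decide (n % 2 = 0)) c = c + (k : Int) := by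
  induction k with
  | zero =>
    intro f n c hf hx
    obtain ⟨f', rfl⟩ : ∃ f', f = f'+1 := ⟨f-1, by omega⟩
    rw [pvALoop, if_pos (by rw [hx]; norm_num)]
    simp
  | succ k ihk =>
    intro f n c hf hx
    obtain ⟨f', rfl⟩ : ∃ f', f = f'+1 := ⟨f-1, by omega⟩
    rw [pvALoop, if_neg (by
      rw [hx]
      intro hcontra
      have := pvGInj n (n+(k+1)) (by exact_mod_cast hcontra)
      omega)]
    rcases Nat.even_or_odd n with ⟨m, hm⟩ | ⟨m, hm⟩
    · have hn : n = 2*m := by omega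
      subst hn
      rw [show decide ((2*m) % 2 = 0) = true by simp]
      rw [if_pos rfl, pvSE m]
      have hstep := ihk f' (2*m+1) (c+1) (by omega) (by rw [hx, show 2*m+(k+1) = 2*m+1+k from by omega])
      rw [show decide ((2*m+1) % 2 = 0) = false by simp] at hstep
      rw [show (!true) = false by rfl, hstep]
      push_cast
      ring
    · subst hm
      rw [show decide ((2*m+1) % 2 = 0) = false by simp]
      rw [if_neg (by decide), pvSO m]
      have hstep := ihk f' (2*m+2) (c+1) (by omega) (by rw [hx, show 2*m+1+(k+1) = 2*m+2+k from by omega])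
      rw [show decide ((2*m+2) % 2 = 0) = true by simp] at hstep
      rw [show 2*m+1+1 = 2*m+2 by omega, show (!false) = true by rfl, hstep]
      push_cast
      ring

-- ===== VERDICT (by name: the statement is the Claim_ definition above) =====
theorem minimumOneBitOperations1_spec : Claim_equal_minimumOneBitOperations1 := by
  intro x hdom hpre
  unfold Spec_minimumOneBitOperations1
  have hpre' : 0 ≤ x := hpre
  have hx : x = ((x.toNat : Nat) : Int) := by omega
  set m := x.toNat with hm
  have hdom' : m < 2^32 := by
    simp [Dom_minimumOneBitOperations1, pvDomInt] at hdom
    omega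
  set k := pvBN m 0 with hk
  have hgk : pvG k = m := pvGBN m
  have hklt : k < 2^32 := pvBNLt 32 m 0 (by omega) (by norm_num)
  have hB : minimumOneBitOperations1_alt x = ((k : Nat) : Int) := by
    unfold minimumOneBitOperations1_alt
    rw [hx, show (0:Int) = ((0:Nat):Int) by norm_num, pvBLoopCast]
  have hA : minimumOneBitOperations1 x = ((k : Nat) : Int) := by
    unfold minimumOneBitOperations1
    have hstep := pvALoopG x k 4294967296 0 0 (by norm_num at hklt ⊢; omega)
      (by rw [hx, ← hgk]; norm_num)
    rw [show ((pvG 0 : Nat) : Int) = (0:Int) by rfl] at hstep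
    rw [show decide ((0:Nat) % 2 = 0) = true by rfl] at hstep
    rw [hstep]
    omega
  rw [hA, hB]
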